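-- pv_equiv track=rewrite | github.com/soyjubilado/AdventOfCode | 2023/01/prog202301.py | RightmostWordIdx
-- ===== SOURCE A (Python) =====
-- NUMBERS = {'one': 1, 'two': 2, 'three': 3, 'four': 4, 'five': 5,
--            'six': 6, 'seven': 7, 'eight': 8, 'nine': 9,}
--
-- def RightmostWordIdx(line):
--   """Return rightmost word and index"""
--   highest_word = None
--   highest_idx = -1
--   for n in NUMBERS:
--     idx = line.rfind(n)
--     if idx > highest_idx:
--       highest_idx = idx
--       highest_word = n
--
--   return highest_word, highest_idx
-- ===== SOURCE B (Python) =====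
-- NUMBERS = {'one': 1, 'two': 2, 'three': 3, 'four': 4, 'five': 5,
--            'six': 6, 'seven': 7, 'eight': 8, 'nine': 9,}
--
-- def RightmostWordIdx(line):
--   """Return rightmost word and index"""
--   for i in range(len(line) - 1, -1, -1):
--     for word in NUMBERS:
--       if line.startswith(word, i):
--         return word, i
--   return None, -1
-- ===== Notes on version B (the rewrite author's own statement) =====
-- stated objective: alternative
-- what changed: Instead of computing rfind for each of the nine words and keeping the maximum index, B scans the line once from right to left and returns the first position where any number word starts.
import Mathlib
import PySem

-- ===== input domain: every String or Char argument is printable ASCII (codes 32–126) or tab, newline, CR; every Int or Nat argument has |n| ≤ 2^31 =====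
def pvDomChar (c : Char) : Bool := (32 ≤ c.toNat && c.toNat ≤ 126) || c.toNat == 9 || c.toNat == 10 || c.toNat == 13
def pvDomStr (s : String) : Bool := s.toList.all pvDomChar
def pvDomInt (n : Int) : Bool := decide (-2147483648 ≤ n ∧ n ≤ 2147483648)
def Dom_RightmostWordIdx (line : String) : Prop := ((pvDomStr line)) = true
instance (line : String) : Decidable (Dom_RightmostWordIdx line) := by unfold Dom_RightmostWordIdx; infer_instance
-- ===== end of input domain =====

-- B scans the line once from right to left returning the first position where a number word
-- starts, instead of A's per-word rfind maximum; same result, a different traversal.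


-- ===== PORT A =====
-- the module constant NUMBERS (a dict; A iterates over its keys in insertion order)
def pvNumbers : List (String × Int) :=
  [("one", 1), ("two", 2), ("three", 3), ("four", 4), ("five", 5),
   ("six", 6), ("seven", 7), ("eight", 8), ("nine", 9)]

def RightmostWordIdx (line : String) : Option String × Int :=
  pvNumbers.foldl
    (fun (st : Option String × Int) (kv : String × Int) =>
      let idx := PySem.Str.rfind line kv.1
      if idx > st.2 then (some kv.1, idx) else st)
    (none, -1)

-- ===== PORT B =====
-- the keys of NUMBERS, in insertion order (B's inner loop iterates these)
def pvWords : List String :=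
  ["one", "two", "three", "four", "five", "six", "seven", "eight", "nine"]

-- inner loop: first word w with line.startswith(w, i); startswith with a start index
-- 0 ≤ i is exactly 'w.toList is a prefix of (toList.drop i)'
def pvCheckAt (cs : List Char) (i : Nat) : Option String :=
  pvWords.find? (fun w => w.toList.isPrefixOf (cs.drop i))

-- outer loop 'for i in range(len(line)-1, -1, -1)': pvBGo cs m visits i = m-1, …, 0
def pvBGo (cs : List Char) : Nat → Option String × Int
  | 0 => (none, -1)
  | k + 1 =>
    match pvCheckAt cs k with
    | some w => (some w, (k : Int))
    | none => pvBGo cs k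

def RightmostWordIdx_alt (line : String) : Option String × Int :=
  pvBGo line.toList line.toList.length

-- ===== PRECONDITION & SPEC =====
def Spec_RightmostWordIdx (line : String) (out : Option String × Int) : Prop := out = RightmostWordIdx_alt line
instance (line : String) (out : Option String × Int) : Decidable (Spec_RightmostWordIdx line out) := by unfold Spec_RightmostWordIdx; infer_instance

-- ===== CLAIM (what is proved, stated in full; the proofs are below) =====
def Claim_equal_RightmostWordIdx : Prop := ∀ (line : String), Dom_RightmostWordIdx line → Spec_RightmostWordIdx line (RightmostWordIdx line)

-- ===== LEMMAS AND PROOFS =====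

-- A's loop body, abstracted over the index function
def pvStep (f : String → Int) (st : Option String × Int) (w : String) : Option String × Int :=
  if f w > st.2 then (some w, f w) else st

def pvAfold (f : String → Int) (ws : List String) (st : Option String × Int) : Option String × Int :=
  ws.foldl (pvStep f) st

lemma pvAfold_congr (f g : String → Int) (ws : List String) (st : Option String × Int)
    (h : ∀ w ∈ ws, f w = g w) : pvAfold f ws st = pvAfold g ws st := by
  induction ws generalizing st with
  | nil => rfl
  | cons w ws ih =>
    simp only [pvAfold, List.foldl_cons, pvStep] at *
    rw [h w List.mem_cons_self]
    exact ih _ (fun x hx => h x (List.mem_cons_of_mem _ hx))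

lemma pvAfold_le (f : String → Int) (ws : List String) (st : Option String × Int)
    (h : ∀ w ∈ ws, f w ≤ st.2) : pvAfold f ws st = st := by
  induction ws with
  | nil => rfl
  | cons w ws ih =>
    simp only [pvAfold, List.foldl_cons, pvStep]
    rw [if_neg (by have := h w List.mem_cons_self; omega)]
    exact ih (fun x hx => h x (List.mem_cons_of_mem _ hx))

lemma pvAfold_base (p : String → Bool) (f : String → Int)
    (hf : ∀ w, f w = if p w then 0 else -1) (ws : List String) :
    pvAfold f ws (none, -1) =
      (match ws.find? p with
       | some w => (some w, 0)
       | none => ((none : Option String), (-1 : Int))) := by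
  induction ws with
  | nil => rfl
  | cons w ws ih =>
    simp only [pvAfold, List.foldl_cons, pvStep, List.find?_cons]
    by_cases hp : p w
    · rw [hp, if_pos (by rw [hf w, if_pos hp]; norm_num)]
      simp only [hf w, if_pos hp]
      exact pvAfold_le f ws (some w, 0) (fun x _ => by rw [hf x]; split <;> omega)
    · rw [Bool.not_eq_true] at hp
      rw [hp, if_neg (by rw [hf w, if_neg (by simp [hp])]; omega)]
      exact ih

lemma pvAfold_unique (f : String → Int) (ws : List String) (st : Option String × Int)
    (m : Int) (wstar : String) (hnd : ws.Nodup) (hmem : wstar ∈ ws) (hw : f wstar = m)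
    (hother : ∀ w ∈ ws, w ≠ wstar → f w < m) (hst : st.2 < m) :
    pvAfold f ws st = (some wstar, m) := by
  induction ws generalizing st with
  | nil => cases hmem
  | cons w ws ih =>
    simp only [pvAfold, List.foldl_cons, pvStep]
    rcases List.mem_cons.mp hmem with rfl | hmem'
    · rw [hw, if_pos hst]
      refine pvAfold_le f ws (some wstar, m) (fun x hx => ?_)
      have hx' : x ≠ wstar := fun he => (List.nodup_cons.mp hnd).1 (he ▸ hx)
      exact le_of_lt (hother x (List.mem_cons_of_mem _ hx) hx')
    · have hwne : w ≠ wstar := by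
        rintro rfl; exact (List.nodup_cons.mp hnd).1 hmem'
      have hlt : f w < m := hother w (by simp) hwne
      split
      · exact ih _ (List.nodup_cons.mp hnd).2 hmem'
          (fun x hx hne => hother x (List.mem_cons_of_mem _ hx) hne) (by simpa using hlt)
      · exact ih _ (List.nodup_cons.mp hnd).2 hmem'
          (fun x hx hne => hother x (List.mem_cons_of_mem _ hx) hne) hst

-- facts about the concrete word list
lemma pvWords_nodup : pvWords.Nodup := by decide

lemma pvWords_ne_nil : ∀ w ∈ pvWords, w.toList ≠ [] := by decide

lemma pvWords_prefix_eq : ∀ w₁ ∈ pvWords, ∀ w₂ ∈ pvWords,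
    w₁.toList <+: w₂.toList → w₁ = w₂ := by decide

-- at most one number word starts at a given position
lemma pvWords_unique (w₁ w₂ : String) (h₁ : w₁ ∈ pvWords) (h₂ : w₂ ∈ pvWords)
    (t : List Char) (p₁ : w₁.toList <+: t) (p₂ : w₂.toList <+: t) : w₁ = w₂ := by
  rcases List.prefix_or_prefix_of_prefix p₁ p₂ with h | h
  · exact pvWords_prefix_eq w₁ h₁ w₂ h₂ h
  · exact (pvWords_prefix_eq w₂ h₂ w₁ h₁ h).symm

-- equation lemmas for PySem's rfind scanner
lemma pvGo_zero (s sub : List Char) :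
    PySem.Chars.rfind.go s sub 0 = if sub.isPrefixOf s then 0 else -1 := rfl

lemma pvGo_succ (s sub : List Char) (k : Nat) :
    PySem.Chars.rfind.go s sub (k + 1) =
      if sub.isPrefixOf (s.drop (k + 1)) then ((k : Int) + 1) else PySem.Chars.rfind.go s sub k := by
  rfl

lemma pvGo_le (s sub : List Char) (k : Nat) : PySem.Chars.rfind.go s sub k ≤ k := by
  induction k with
  | zero => rw [pvGo_zero]; split <;> omega
  | succ k ih => rw [pvGo_succ]; split <;> omega

-- MAIN: A's fold with scan bound k equals B's downward scan over positions k, …, 0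
lemma pv_main (cs : List Char) (k : Nat) :
    pvAfold (fun w => PySem.Chars.rfind.go cs w.toList k) pvWords (none, -1) = pvBGo cs (k + 1) := by
  induction k with
  | zero =>
    rw [pvAfold_base (fun w => w.toList.isPrefixOf cs)
      (fun w => PySem.Chars.rfind.go cs w.toList 0) (fun w => pvGo_zero cs w.toList)]
    simp only [pvBGo, pvCheckAt, List.drop_zero]
    cases hf : List.find? (fun w => w.toList.isPrefixOf cs) pvWords <;> simp
  | succ k ih =>
    show _ = pvBGo cs (k + 1 + 1)
    rw [pvBGo]
    cases hfind : pvCheckAt cs (k + 1) with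
    | none =>
      have hnone : ∀ w ∈ pvWords, ¬ (w.toList.isPrefixOf (cs.drop (k + 1)) = true) := by
        intro w hw
        have := List.find?_eq_none.mp hfind w hw
        simpa using this
      rw [← ih]
      apply pvAfold_congr
      intro w hw
      rw [pvGo_succ, if_neg (hnone w hw)]
    | some wstar =>
      simp only [pvCheckAt] at hfind
      have hmem : wstar ∈ pvWords := List.mem_of_find?_eq_some hfind
      have hpred : wstar.toList.isPrefixOf (cs.drop (k + 1)) = true := by
        have := List.find?_some hfind; simpa using this
      refine pvAfold_unique _ _ (none, -1) (((k + 1 : Nat) : Int)) wstar pvWords_nodup hmem ?_ ?_ (by omega)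
      · rw [pvGo_succ, if_pos hpred]; push_cast; ring
      · intro w hw hne
        rw [pvGo_succ]
        have hnp : ¬ (w.toList.isPrefixOf (cs.drop (k + 1)) = true) := by
          intro hp
          exact hne (pvWords_unique w wstar hw hmem _ (List.isPrefixOf_iff_prefix.mp hp)
            (List.isPrefixOf_iff_prefix.mp hpred))
        rw [if_neg hnp]
        have := pvGo_le cs w.toList k
        push_cast
        omega

-- A's foldl over the dict's pairs is pvAfold over the keys
lemma pvA_eq (line : String) :
    RightmostWordIdx line = pvAfold (fun w => PySem.Str.rfind line w) pvWords (none, -1) := by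
  rfl

-- ===== VERDICT (by name: the statement is the Claim_ definition above) =====
theorem RightmostWordIdx_spec : Claim_equal_RightmostWordIdx := by
  intro line _
  unfold Spec_RightmostWordIdx RightmostWordIdx_alt
  rw [pvA_eq]
  have hg : ∀ w ∈ pvWords, PySem.Str.rfind line w
      = PySem.Chars.rfind.go line.toList w.toList line.toList.length := by
    intro w _
    rw [PySem.Str.rfind_eq]
    rfl
  rw [pvAfold_congr _ _ _ _ hg]
  cases hlen : line.toList.length with
  | zero =>
    rw [List.length_eq_zero_iff.mp hlen]
    apply pvAfold_le
    intro w hw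
    rw [pvGo_zero]
    rw [if_neg (by simpa using pvWords_ne_nil w hw)]
  | succ m =>
    have hstep : ∀ w ∈ pvWords,
        PySem.Chars.rfind.go line.toList w.toList (m + 1)
          = PySem.Chars.rfind.go line.toList w.toList m := by
      intro w hw
      rw [pvGo_succ]
      rw [if_neg ?_]
      have hdrop : line.toList.drop (m + 1) = [] := by
        apply List.drop_eq_nil_of_le; omega
      rw [hdrop]
      simpa using pvWords_ne_nil w hw
    rw [pvAfold_congr _ _ _ _ hstep, pv_main]
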